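-- pv_equiv track=rewrite | github.com/hkcto/marksix | marksix.py | oneShort
-- ===== SOURCE A (Python) =====
-- def oneShort(six):
--
--     """欠一門"""
--     oneset = []
--     zero = [0, 1, 2, 3, 4, 5, 6, 7, 8, 9]
--     ten = [10, 11, 12, 13, 14, 15, 16, 17, 18, 19]
--     twenty = [20, 21, 22, 23, 24, 25, 26, 27, 28, 29]
--     thirty = [30, 31, 32, 33, 34, 35, 36, 37, 38, 39]
--     forty = [40, 41, 42, 43, 44, 45, 46, 47, 48, 49]
--     for number in six:
--         match number:
--             case number if number in zero:
--                 oneset.append("zero")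
--             case number if number in ten:
--                 oneset.append("ten")
--             case number if number in twenty:
--                 oneset.append("twenty")
--             case number if number in thirty:
--                 oneset.append("thirty")
--             case number if number in forty:
--                 oneset.append("forty")
--     oneset = set(oneset)
--     if len(oneset) >= 5:
--         return False
--     return True
-- ===== SOURCE B (Python) =====
-- def oneShort(six):
--     """欠一門"""
--     return any(
--         not any(10 * k <= n < 10 * (k + 1) for n in six)
--         for k in range(5)
--     )
-- ===== Notes on version B (the rewrite author's own statement) =====
-- stated objective: simpler
-- what changed: Inverts the traversal: instead of one pass over the numbers building a set of decade labels and counting its size, B loops over the five decade groups and returns True iff some group contains no element of six (short-circuiting), eliminating the per-element 10-item list scans, the label set and the counting entirely.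
import Mathlib
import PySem

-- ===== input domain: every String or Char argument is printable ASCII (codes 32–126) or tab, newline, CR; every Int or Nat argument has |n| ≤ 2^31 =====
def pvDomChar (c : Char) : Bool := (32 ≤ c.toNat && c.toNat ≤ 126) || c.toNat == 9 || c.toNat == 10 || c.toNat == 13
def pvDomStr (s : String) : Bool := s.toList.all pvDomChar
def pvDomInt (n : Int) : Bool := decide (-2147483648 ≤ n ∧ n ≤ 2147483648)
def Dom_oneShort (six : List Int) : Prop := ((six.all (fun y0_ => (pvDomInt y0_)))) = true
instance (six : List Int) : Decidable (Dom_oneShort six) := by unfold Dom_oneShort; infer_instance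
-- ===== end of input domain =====

-- B inverts the traversal: it loops over the five decade groups and returns true iff some
-- group has no element of six, instead of A's pass over six building a set of labels (objective: simpler).

-- ===== PORT A =====
def oneShort (six : List Int) : Bool :=
  let zero : List Int := [0, 1, 2, 3, 4, 5, 6, 7, 8, 9]
  let ten : List Int := [10, 11, 12, 13, 14, 15, 16, 17, 18, 19]
  let twenty : List Int := [20, 21, 22, 23, 24, 25, 26, 27, 28, 29]
  let thirty : List Int := [30, 31, 32, 33, 34, 35, 36, 37, 38, 39]
  let forty : List Int := [40, 41, 42, 43, 44, 45, 46, 47, 48, 49]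
  let oneset : List String := six.foldl (fun acc number =>
    if zero.contains number then acc ++ ["zero"]
    else if ten.contains number then acc ++ ["ten"]
    else if twenty.contains number then acc ++ ["twenty"]
    else if thirty.contains number then acc ++ ["thirty"]
    else if forty.contains number then acc ++ ["forty"]
    else acc) []
  let onesetS : PySem.Set String := PySem.Set.ofList oneset
  if 5 ≤ PySem.Set.len onesetS then false else true

-- ===== PORT B =====
def oneShort_alt (six : List Int) : Bool :=
  (PySem.List.pyRange 0 5 1).any (fun k =>
    ! six.any (fun n => decide (10 * k ≤ n ∧ n < 10 * (k + 1))))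

-- ===== PRECONDITION & SPEC =====
def Spec_oneShort (six : List Int) (out : Bool) : Prop := out = oneShort_alt six
instance (six : List Int) (out : Bool) : Decidable (Spec_oneShort six out) := by unfold Spec_oneShort; infer_instance

-- ===== CLAIM (what is proved, stated in full; the proofs are below) =====
def Claim_equal_oneShort : Prop := ∀ (six : List Int), Dom_oneShort six → Spec_oneShort six (oneShort six)

-- ===== LEMMAS AND PROOFS =====

-- decade index of an in-range number (proof-side helper)
def pvDec? (n : Int) : Option Int :=
  if 0 ≤ n ∧ n < 50 then some (PySem.Int.floordiv n 10) else none

-- decade index → A's label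
def pvName (k : Int) : String :=
  if k = 0 then "zero" else if k = 1 then "ten" else if k = 2 then "twenty"
  else if k = 3 then "thirty" else "forty"

theorem pv_mem0 (n : Int) : n ∈ ([0,1,2,3,4,5,6,7,8,9] : List Int) ↔ 0 ≤ n ∧ n < 10 := by
  simp only [List.mem_cons, List.not_mem_nil, or_false]; omega
theorem pv_mem1 (n : Int) : n ∈ ([10,11,12,13,14,15,16,17,18,19] : List Int) ↔ 10 ≤ n ∧ n < 20 := by
  simp only [List.mem_cons, List.not_mem_nil, or_false]; omega
theorem pv_mem2 (n : Int) : n ∈ ([20,21,22,23,24,25,26,27,28,29] : List Int) ↔ 20 ≤ n ∧ n < 30 := by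
  simp only [List.mem_cons, List.not_mem_nil, or_false]; omega
theorem pv_mem3 (n : Int) : n ∈ ([30,31,32,33,34,35,36,37,38,39] : List Int) ↔ 30 ≤ n ∧ n < 40 := by
  simp only [List.mem_cons, List.not_mem_nil, or_false]; omega
theorem pv_mem4 (n : Int) : n ∈ ([40,41,42,43,44,45,46,47,48,49] : List Int) ↔ 40 ≤ n ∧ n < 50 := by
  simp only [List.mem_cons, List.not_mem_nil, or_false]; omega

theorem pv_fd (n k : Int) (h1 : 10 * k ≤ n) (h2 : n < 10 * (k + 1)) :
    PySem.Int.floordiv n 10 = k :=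
  (PySem.Int.floordiv_eq_iff_of_pos (by omega)).mpr ⟨by omega, by omega⟩

-- one step of A's loop produces exactly the (optional) label of n's decade
theorem pv_stepA (acc : List String) (n : Int) :
    (if ([0,1,2,3,4,5,6,7,8,9] : List Int).contains n then acc ++ ["zero"]
      else if ([10,11,12,13,14,15,16,17,18,19] : List Int).contains n then acc ++ ["ten"]
      else if ([20,21,22,23,24,25,26,27,28,29] : List Int).contains n then acc ++ ["twenty"]
      else if ([30,31,32,33,34,35,36,37,38,39] : List Int).contains n then acc ++ ["thirty"]
      else if ([40,41,42,43,44,45,46,47,48,49] : List Int).contains n then acc ++ ["forty"]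
      else acc)
    = acc ++ ((pvDec? n).map pvName).toList := by
  simp only [List.contains_iff_mem, pv_mem0, pv_mem1, pv_mem2, pv_mem3, pv_mem4]
  split_ifs with c0 c1 c2 c3 c4
  · rw [show pvDec? n = some 0 by
        simp only [pvDec?, if_pos (by omega : 0 ≤ n ∧ n < 50)]
        rw [pv_fd n 0 (by omega) (by omega)]]
    rfl
  · rw [show pvDec? n = some 1 by
        simp only [pvDec?, if_pos (by omega : 0 ≤ n ∧ n < 50)]
        rw [pv_fd n 1 (by omega) (by omega)]]
    rfl
  · rw [show pvDec? n = some 2 by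
        simp only [pvDec?, if_pos (by omega : 0 ≤ n ∧ n < 50)]
        rw [pv_fd n 2 (by omega) (by omega)]]
    rfl
  · rw [show pvDec? n = some 3 by
        simp only [pvDec?, if_pos (by omega : 0 ≤ n ∧ n < 50)]
        rw [pv_fd n 3 (by omega) (by omega)]]
    rfl
  · rw [show pvDec? n = some 4 by
        simp only [pvDec?, if_pos (by omega : 0 ≤ n ∧ n < 50)]
        rw [pv_fd n 4 (by omega) (by omega)]]
    rfl
  · rw [show pvDec? n = none by simp only [pvDec?, if_neg (by omega : ¬ (0 ≤ n ∧ n < 50))]]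
    simp

-- A's loop builds the list of labels of the in-range numbers, in order
theorem pv_foldA (six : List Int) (acc : List String) :
    six.foldl (fun acc number =>
      if ([0,1,2,3,4,5,6,7,8,9] : List Int).contains number then acc ++ ["zero"]
      else if ([10,11,12,13,14,15,16,17,18,19] : List Int).contains number then acc ++ ["ten"]
      else if ([20,21,22,23,24,25,26,27,28,29] : List Int).contains number then acc ++ ["twenty"]
      else if ([30,31,32,33,34,35,36,37,38,39] : List Int).contains number then acc ++ ["thirty"]
      else if ([40,41,42,43,44,45,46,47,48,49] : List Int).contains number then acc ++ ["forty"]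
      else acc) acc
    = acc ++ six.filterMap (fun n => (pvDec? n).map pvName) := by
  induction six generalizing acc with
  | nil => simp
  | cons n t ih =>
    simp only [List.foldl_cons, List.filterMap_cons]
    rw [pv_stepA, ih]
    cases (pvDec? n).map pvName <;> simp

-- a nodup list included in a nodup list K has the length of K's filter by membership
theorem pv_card_filter {α : Type} [DecidableEq α] (S K : List α)
    (hS : S.Nodup) (hK : K.Nodup) (hsub : ∀ x ∈ S, x ∈ K) :
    S.length = (K.filter (fun x => decide (x ∈ S))).length := by
  have hperm : S.Perm (K.filter (fun x => decide (x ∈ S))) := by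
    rw [List.perm_ext_iff_of_nodup hS (hK.filter _)]
    intro a
    simp only [List.mem_filter, decide_eq_true_eq]
    exact ⟨fun h => ⟨hsub a h, h⟩, fun h => h.2⟩
  exact hperm.length_eq

-- pvDec? hits k (for a decade index k in [0,5)) exactly on the k-th decade
theorem pv_dec_eq_some (n k : Int) (hk0 : 0 ≤ k) (hk5 : k < 5) :
    pvDec? n = some k ↔ 10 * k ≤ n ∧ n < 10 * (k + 1) := by
  simp only [pvDec?]
  split_ifs with h
  · simp only [Option.some.injEq]
    constructor
    · intro he
      rw [PySem.Int.floordiv_eq_ediv_of_pos (by omega : (0:Int) < 10)] at he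
      omega
    · intro ⟨h1, h2⟩; exact pv_fd n k h1 h2
  · simp only [false_iff]
    omega

-- every produced decade index lies in [0, 5)
theorem pv_dec_bounds (l : List Int) : ∀ x ∈ l.filterMap pvDec?, 0 ≤ x ∧ x < 5 := by
  intro x hx
  rw [List.mem_filterMap] at hx
  obtain ⟨n, _, hn⟩ := hx
  simp only [pvDec?] at hn
  split_ifs at hn with h
  · cases hn
    rw [PySem.Int.floordiv_eq_ediv_of_pos (by omega : (0:Int) < 10)]
    omega

-- label k is in A's dedup'd label set iff six meets the k-th decade (B's inner test)
theorem pv_label_mem (six : List Int) (k : Int) (hk0 : 0 ≤ k) (hk5 : k < 5) :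
    pvName k ∈ PySem.Set.ofList (six.filterMap (fun n => (pvDec? n).map pvName))
      ↔ six.any (fun n => decide (10 * k ≤ n ∧ n < 10 * (k + 1))) = true := by
  rw [PySem.Set.mem_ofList, List.mem_filterMap, List.any_eq_true]
  constructor
  · rintro ⟨n, hn, he⟩
    rw [Option.map_eq_some_iff] at he
    obtain ⟨x, hx, hname⟩ := he
    have hxb : 0 ≤ x ∧ x < 5 := pv_dec_bounds [n] x (by
      rw [List.mem_filterMap]; exact ⟨n, List.mem_singleton.mpr rfl, hx⟩)
    have hxk : x = k := by
      obtain ⟨hx0, hx5⟩ := hxb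
      interval_cases x <;> interval_cases k <;>
        first | rfl | (exact absurd hname (by decide))
    subst hxk
    exact ⟨n, hn, by rw [decide_eq_true_iff]; exact (pv_dec_eq_some n x hk0 hk5).mp hx⟩
  · rintro ⟨n, hn, hd⟩
    rw [decide_eq_true_iff] at hd
    exact ⟨n, hn, by rw [(pv_dec_eq_some n k hk0 hk5).mpr hd]; rfl⟩

-- ===== VERDICT (by name: the statement is the Claim_ definition above) =====
theorem oneShort_spec : Claim_equal_oneShort := by
  intro six _
  unfold Spec_oneShort oneShort oneShort_alt
  simp only [pv_foldA, List.nil_append]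
  rw [show PySem.List.pyRange 0 5 1 = ([0,1,2,3,4] : List Int) from by decide]
  set L := six.filterMap (fun n => (pvDec? n).map pvName) with hL
  have hsub : ∀ x ∈ PySem.Set.ofList L, x ∈ (["zero","ten","twenty","thirty","forty"] : List String) := by
    intro x hx
    rw [PySem.Set.mem_ofList, hL, List.mem_filterMap] at hx
    obtain ⟨n, hn, he⟩ := hx
    rw [Option.map_eq_some_iff] at he
    obtain ⟨y, hy, hname⟩ := he
    obtain ⟨h0, h5⟩ := pv_dec_bounds [n] y (by
      rw [List.mem_filterMap]; exact ⟨n, List.mem_singleton.mpr rfl, hy⟩)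
    subst hname
    interval_cases y <;> decide
  have hlen : (PySem.Set.ofList L).length
      = ((["zero","ten","twenty","thirty","forty"] : List String).filter
          (fun x => decide (x ∈ PySem.Set.ofList L))).length :=
    pv_card_filter _ _ (PySem.Set.nodup_ofList _) (by decide) hsub
  have h0 := pv_label_mem six 0 (by omega) (by omega)
  have h1 := pv_label_mem six 1 (by omega) (by omega)
  have h2 := pv_label_mem six 2 (by omega) (by omega)
  have h3 := pv_label_mem six 3 (by omega) (by omega)
  have h4 := pv_label_mem six 4 (by omega) (by omega)
  rw [show pvName 0 = "zero" from rfl] at h0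
  rw [show pvName 1 = "ten" from rfl] at h1
  rw [show pvName 2 = "twenty" from rfl] at h2
  rw [show pvName 3 = "thirty" from rfl] at h3
  rw [show pvName 4 = "forty" from rfl] at h4
  rw [← hL] at h0 h1 h2 h3 h4
  simp only [PySem.Set.len, hlen, List.filter_cons, List.filter_nil,
    List.any_cons, List.any_nil, propext h0, propext h1, propext h2, propext h3, propext h4,
    Bool.decide_eq_true]
  generalize (six.any fun n => decide (10 * 0 ≤ n ∧ n < 10 * (0 + 1))) = b0
  generalize (six.any fun n => decide (10 * 1 ≤ n ∧ n < 10 * (1 + 1))) = b1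
  generalize (six.any fun n => decide (10 * 2 ≤ n ∧ n < 10 * (2 + 1))) = b2
  generalize (six.any fun n => decide (10 * 3 ≤ n ∧ n < 10 * (3 + 1))) = b3
  generalize (six.any fun n => decide (10 * 4 ≤ n ∧ n < 10 * (4 + 1))) = b4
  cases b0 <;> cases b1 <;> cases b2 <;> cases b3 <;> cases b4 <;> decide
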